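-- pv_equiv track=rewrite | github.com/DmytroZamkovyi/kpi-ads-2 | lab_2/is13.zamkovyi.14.py | find
-- ===== SOURCE A (Python) =====
-- def find(data: [], x: int) -> []:
--     res = {}
--     res[0] = str(x)
--     for i in range(1, int(data[0][0])+1):
--         inv = 0
--         for j in range(int(data[0][0])):
--             for k in range(j+1, int(data[0][1])):
--                 if data[x][j] > data[i][k]:
--                     inv += 1
--         res[i] = '\n' + str(i) + ' ' + str(inv)
--
--     return res
-- ===== SOURCE B (Python) =====
-- def _bisect_right(arr, v):
--     lo, hi = 0, len(arr)
--     while lo < hi: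
--         mid = (lo + hi) // 2
--         if v < arr[mid]:
--             hi = mid
--         else:
--             lo = mid + 1
--     return lo
--
--
-- def find(data: [], x: int) -> []:
--     res = {}
--     res[0] = str(x)
--     n = int(data[0][0])
--     if n >= 1:
--         m = int(data[0][1])
--         prefs = []
--         if m >= 2:
--             a = data[x]
--             pref = []
--             for k in range(1, m):
--                 if k - 1 < n:
--                     v = a[k - 1]
--                     pref.insert(_bisect_right(pref, v), v)
--                 prefs.append(list(pref))
--         for i in range(1, n + 1):
--             inv = 0
--             for k in range(1, m):
--                 pf = prefs[k - 1]
--                 inv += len(pf) - _bisect_right(pf, data[i][k])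
--             res[i] = '\n' + str(i) + ' ' + str(inv)
--     return res
-- ===== Notes on version B (the rewrite author's own statement) =====
-- stated objective: alternative
-- what changed: Replaces the per-row triple loop (for each row i, scan all index pairs j<k) by sorted prefixes of row x built once by binary-search insertion, answering each (i,k) cell with one binary search instead of an inner scan.
import Mathlib
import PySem

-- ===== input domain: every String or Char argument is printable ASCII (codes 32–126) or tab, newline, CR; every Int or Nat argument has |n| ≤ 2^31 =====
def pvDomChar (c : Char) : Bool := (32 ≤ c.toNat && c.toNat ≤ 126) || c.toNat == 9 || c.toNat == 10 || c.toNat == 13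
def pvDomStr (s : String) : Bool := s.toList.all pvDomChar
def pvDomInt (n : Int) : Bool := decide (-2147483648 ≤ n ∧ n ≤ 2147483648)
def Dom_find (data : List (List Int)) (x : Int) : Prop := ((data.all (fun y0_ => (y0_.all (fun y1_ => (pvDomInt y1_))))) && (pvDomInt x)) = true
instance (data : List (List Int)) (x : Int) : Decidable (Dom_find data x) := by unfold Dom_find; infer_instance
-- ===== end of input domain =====

-- B replaces A's per-row scan over all index pairs (j,k) by sorted prefixes of row x built once
-- plus one binary search per cell: a structurally different algorithm, same return value.

-- ===== PORT A =====
def find (data : List (List Int)) (x : Int) : List (Int × String) :=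
  let res : PySem.Dict Int String := PySem.Dict.insert ⟨[]⟩ 0 (PySem.Int.toStr x)
  let n := PySem.List.pyGetD (PySem.List.pyGetD data 0 []) 0 0
  ((PySem.List.pyRange 1 (n + 1) 1).foldl (fun res i =>
    let inv : Int := (PySem.List.pyRange 0 n 1).foldl (fun inv j =>
      (PySem.List.pyRange (j + 1) (PySem.List.pyGetD (PySem.List.pyGetD data 0 []) 1 0) 1).foldl
        (fun inv k =>
          if PySem.List.pyGetD (PySem.List.pyGetD data x []) j 0 >
             PySem.List.pyGetD (PySem.List.pyGetD data i []) k 0 then inv + 1 else inv) inv) 0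
    PySem.Dict.insert res i ("\n" ++ PySem.Int.toStr i ++ " " ++ PySem.Int.toStr inv)) res).items

-- ===== PORT B =====
-- Source B's _bisect_right helper is the textbook bisect loop = PySem.List.bisectRight.
def find_alt (data : List (List Int)) (x : Int) : List (Int × String) :=
  let res : PySem.Dict Int String := PySem.Dict.insert ⟨[]⟩ 0 (PySem.Int.toStr x)
  let n := PySem.List.pyGetD (PySem.List.pyGetD data 0 []) 0 0
  if 1 ≤ n then
    let m := PySem.List.pyGetD (PySem.List.pyGetD data 0 []) 1 0
    let prefs : List (List Int) :=
      if 2 ≤ m then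
        let a := PySem.List.pyGetD data x []
        ((PySem.List.pyRange 1 m 1).foldl
          (fun (s : List Int × List (List Int)) k =>
            let pref := if k - 1 < n then
                let v := PySem.List.pyGetD a (k - 1) 0
                PySem.List.insert s.1 ((PySem.List.bisectRight s.1 v : Nat) : Int) v
              else s.1
            (pref, s.2 ++ [pref])) ([], [])).2
      else []
    ((PySem.List.pyRange 1 (n + 1) 1).foldl (fun res i =>
      let inv : Int := (PySem.List.pyRange 1 m 1).foldl (fun inv k =>
        let pf := PySem.List.pyGetD prefs (k - 1) []
        inv + ((pf.length : Int) -
          (PySem.List.bisectRight pf (PySem.List.pyGetD (PySem.List.pyGetD data i []) k 0) : Nat))) 0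
      PySem.Dict.insert res i ("\n" ++ PySem.Int.toStr i ++ " " ++ PySem.Int.toStr inv)) res).items
  else res.items

-- ===== PRECONDITION & SPEC =====
-- Pre_find holds exactly where the Python A returns without raising: data[0][0]/data[0][1] must
-- exist as used, and when the comparison loops actually run (N ≥ 1 and M ≥ 2) every index the
-- loops touch must be in range (x may be a negative Python index).
def Pre_find (data : List (List Int)) (x : Int) : Prop :=
  data ≠ [] ∧ PySem.List.pyGetD data 0 [] ≠ [] ∧
  (1 ≤ PySem.List.pyGetD (PySem.List.pyGetD data 0 []) 0 0 →
    2 ≤ ((PySem.List.pyGetD data 0 []).length : Int) ∧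
    (2 ≤ PySem.List.pyGetD (PySem.List.pyGetD data 0 []) 1 0 →
      PySem.Raise.InRange data.length x ∧
      min (PySem.List.pyGetD (PySem.List.pyGetD data 0 []) 0 0)
          (PySem.List.pyGetD (PySem.List.pyGetD data 0 []) 1 0 - 1) ≤
        ((PySem.List.pyGetD data x []).length : Int) ∧
      PySem.List.pyGetD (PySem.List.pyGetD data 0 []) 0 0 + 1 ≤ (data.length : Int) ∧
      ∀ i ∈ PySem.List.pyRange 1 (PySem.List.pyGetD (PySem.List.pyGetD data 0 []) 0 0 + 1) 1,
        PySem.List.pyGetD (PySem.List.pyGetD data 0 []) 1 0 ≤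
          ((PySem.List.pyGetD data i []).length : Int)))
instance (data : List (List Int)) (x : Int) : Decidable (Pre_find data x) := by
  unfold Pre_find; infer_instance

def pvWitness_find : List (List Int) × Int := ([[2, 2], [5, 1], [3, 4]], 1)

def Spec_find (data : List (List Int)) (x : Int) (out : List (Int × String)) : Prop :=
  out = find_alt data x
instance (data : List (List Int)) (x : Int) (out : List (Int × String)) :
    Decidable (Spec_find data x out) := by unfold Spec_find; infer_instance

-- ===== CLAIM (what is proved, stated in full; the proofs are below) =====
def Claim_equal_find : Prop := ∀ (data : List (List Int)) (x : Int),
  Dom_find data x → Pre_find data x → Spec_find data x (find data x)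

-- ===== LEMMAS AND PROOFS =====

-- list sum over a Python range is a Finset.Ico sum
theorem pv_sum_map_pyRange (f : Int → Int) (a b : Int) :
    ((PySem.List.pyRange a b 1).map f).sum = ∑ v ∈ Finset.Ico a b, f v := by
  induction h : (b - a).toNat generalizing b with
  | zero =>
      rw [PySem.List.pyRange_one_eq_nil (by omega), Finset.Ico_eq_empty (by simp; omega)]; simp
  | succ t ih =>
      have hb : b = (b - 1) + 1 := by ring
      rw [hb, PySem.List.pyRange_one_succ_right (by omega),
        ← Finset.insert_Ico_right_eq_Ico_add_one (a := a) (b := b - 1) (by omega),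
        List.map_append, List.sum_append, Finset.sum_insert (by simp), ih (b - 1) (by omega)]
      simp [add_comm]

theorem pv_countP_pyRange (p : Int → Bool) (a b : Int) :
    (((PySem.List.pyRange a b 1).countP p : Nat) : Int)
      = ∑ v ∈ Finset.Ico a b, (if p v then (1 : Int) else 0) := by
  rw [← PySem.List.sum_map_ite_one_zero p, pv_sum_map_pyRange]

-- the double-counting swap: pairs (j,k) with 0 ≤ j < n, j < k < m, counted per j vs per k
theorem pv_swap_sum (F : Int → Int → Int) (n m : Int) :
    ∑ j ∈ Finset.Ico (0 : Int) n, ∑ k ∈ Finset.Ico (j + 1) m, F j k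
      = ∑ k ∈ Finset.Ico (1 : Int) m, ∑ j ∈ Finset.Ico (0 : Int) (min k n), F j k := by
  have h1 : ∀ j ∈ Finset.Ico (0 : Int) n,
      ∑ k ∈ Finset.Ico (j + 1) m, F j k
        = ∑ k ∈ Finset.Ico (1 : Int) m, if j < k then F j k else 0 := by
    intro j hj
    simp only [Finset.mem_Ico] at hj
    rw [← Finset.sum_filter]
    congr 1
    ext k
    simp only [Finset.mem_Ico, Finset.mem_filter]
    omega
  rw [Finset.sum_congr rfl h1, Finset.sum_comm]
  refine Finset.sum_congr rfl ?_
  intro k hk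
  rw [← Finset.sum_filter]
  congr 1
  ext j
  simp only [Finset.mem_Ico, Finset.mem_filter]
  omega

-- inserting v at an upper-bound split position r is insertBy
theorem pv_insertBy_eq_take_drop (v : Int) (l : List Int) (r : Nat) (hr : r ≤ l.length)
    (h1 : ∀ (idx : Nat) (h : idx < l.length), idx < r → l[idx] ≤ v)
    (h2 : ∀ (idx : Nat) (h : idx < l.length), r ≤ idx → v < l[idx]) :
    PySem.List.insert l (r : Int) v = PySem.List.insertBy (fun a b => decide (a < b)) v l := by
  rw [PySem.List.insert_natCast l r v hr]
  induction l generalizing r with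
  | nil =>
      have : r = 0 := by simpa using hr
      subst this
      simp [PySem.List.insertBy]
  | cons y ys ih =>
      by_cases hv : v < y
      · have hr0 : r = 0 := by
          by_contra h
          have h0 : (0 : Nat) < r := Nat.pos_of_ne_zero h
          have := h1 0 (by simp) h0
          simp at this
          omega
        subst hr0
        simp [PySem.List.insertBy, hv]
      · have hr0 : r ≠ 0 := by
          intro h
          subst h
          have := h2 0 (by simp) (Nat.le_refl 0)
          simp at this
          exact hv this
        obtain ⟨r', rfl⟩ : ∃ r', r = r' + 1 := ⟨r - 1, by omega⟩
        simp only [PySem.List.insertBy, List.take_succ_cons, List.drop_succ_cons, List.cons_append]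
        rw [if_neg (by simpa using hv)]
        congr 1
        exact ih r' (by simpa using hr)
          (fun idx h hlt => by simpa using h1 (idx + 1) (by simpa using h) (by omega))
          (fun idx h hge => by simpa using h2 (idx + 1) (by simpa using h) (by omega))

-- inserting at the bisect_right position of a sorted list is insertBy
theorem pv_insert_bisectRight (l : List Int) (v : Int) (hs : l.Pairwise (· ≤ ·)) :
    PySem.List.insert l ((PySem.List.bisectRight l v : Nat) : Int) v
      = PySem.List.insertBy (fun a b => decide (a < b)) v l := by
  obtain ⟨hle, hA, hB⟩ := PySem.List.bisectRight_spec l v hs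
  exact pv_insertBy_eq_take_drop v l _ hle hA hB

-- on a sorted list, length - bisect_right = the number of strictly greater elements
theorem pv_count_gt (l : List Int) (b : Int) (hs : l.Pairwise (· ≤ ·)) :
    (l.length : Int) - (PySem.List.bisectRight l b : Nat) =
      (l.countP (fun w => decide (b < w)) : Nat) := by
  obtain ⟨hle, hA, hB⟩ := PySem.List.bisectRight_spec l b hs
  set r := PySem.List.bisectRight l b with hr
  have hcount : l.countP (fun w => decide (b < w)) = l.length - r := by
    conv_lhs => rw [← List.take_append_drop r l]
    rw [List.countP_append]
    have ht : (l.take r).countP (fun w => decide (b < w)) = 0 := by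
      rw [List.countP_eq_zero]
      intro w hw
      obtain ⟨idx, hidx, hwe⟩ := List.getElem_of_mem hw
      have hidx' : idx < r := by
        simp [List.length_take] at hidx
        omega
      rw [List.getElem_take] at hwe
      have := hA idx (by omega) hidx'
      simp [← hwe]
      omega
    have hd : (l.drop r).countP (fun w => decide (b < w)) = (l.drop r).length := by
      rw [List.countP_eq_length]
      intro w hw
      obtain ⟨idx, hidx, hwe⟩ := List.getElem_of_mem hw
      rw [List.getElem_drop] at hwe
      have := hB (r + idx) (by simp [List.length_drop] at hidx; omega) (by omega)
      simp [← hwe]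
      omega
    rw [ht, hd]
    simp [List.length_drop]
  omega

-- the sorted prefix of row x used for column k
def pvS (av : List Int) (nn k : Int) : List Int :=
  PySem.List.sorted ((PySem.List.pyRange 0 (min k nn) 1).map (fun j => PySem.List.pyGetD av j 0))
    (fun v => v)

theorem pvS_pairwise (av : List Int) (nn k : Int) : (pvS av nn k).Pairwise (· ≤ ·) := by
  simpa using PySem.List.sorted_pairwise
    ((PySem.List.pyRange 0 (min k nn) 1).map (fun j => PySem.List.pyGetD av j 0)) (fun v => v)

theorem pv_pf (S : Int → List Int) (mm k : Int) (hk : 1 ≤ k) (hkm : k < mm) :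
    PySem.List.pyGetD ((PySem.List.pyRange 1 mm 1).map S) (k - 1) [] = S k := by
  rw [PySem.List.pyGetD_eq_getElem _ _ (by omega)
      (by simp [PySem.List.length_pyRange_one]; omega)]
  rw [List.getElem_map, PySem.List.getElem_pyRange_one]
  congr 1
  omega

theorem pv_inv_eq (av row : List Int) (nn mm : Int) :
    (PySem.List.pyRange 0 nn 1).foldl (fun inv j =>
      (PySem.List.pyRange (j + 1) mm 1).foldl
        (fun inv k => if PySem.List.pyGetD av j 0 > PySem.List.pyGetD row k 0 then inv + 1 else inv) inv) 0
    = (PySem.List.pyRange 1 mm 1).foldl (fun inv k =>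
        inv + (((PySem.List.pyGetD ((PySem.List.pyRange 1 mm 1).map (pvS av nn)) (k - 1) []).length : Int) -
          ((PySem.List.bisectRight (PySem.List.pyGetD ((PySem.List.pyRange 1 mm 1).map (pvS av nn)) (k - 1) [])
             (PySem.List.pyGetD row k 0) : Nat) : Int))) 0 := by
  have hL : (PySem.List.pyRange 0 nn 1).foldl (fun inv j =>
      (PySem.List.pyRange (j + 1) mm 1).foldl
        (fun inv k => if PySem.List.pyGetD av j 0 > PySem.List.pyGetD row k 0 then inv + 1 else inv) inv) 0
      = ∑ j ∈ Finset.Ico (0 : Int) nn, ∑ k ∈ Finset.Ico (j + 1) mm,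
          (if decide (PySem.List.pyGetD row k 0 < PySem.List.pyGetD av j 0) then (1 : Int) else 0) := by
    rw [PySem.List.foldl_congr_mem _ _
        (fun inv j => inv + (((PySem.List.pyRange (j + 1) mm 1).countP
          (fun k => decide (PySem.List.pyGetD row k 0 < PySem.List.pyGetD av j 0)) : Nat) : Int)) 0
        (fun acc j _ => PySem.List.foldl_ite_add_one _ _ acc)]
    rw [PySem.List.foldl_add, zero_add, pv_sum_map_pyRange]
    exact Finset.sum_congr rfl (fun j _ => pv_countP_pyRange _ _ _)
  have hR : (PySem.List.pyRange 1 mm 1).foldl (fun inv k =>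
        inv + (((PySem.List.pyGetD ((PySem.List.pyRange 1 mm 1).map (pvS av nn)) (k - 1) []).length : Int) -
          ((PySem.List.bisectRight (PySem.List.pyGetD ((PySem.List.pyRange 1 mm 1).map (pvS av nn)) (k - 1) [])
             (PySem.List.pyGetD row k 0) : Nat) : Int))) 0
      = ∑ k ∈ Finset.Ico (1 : Int) mm, ∑ j ∈ Finset.Ico (0 : Int) (min k nn),
          (if decide (PySem.List.pyGetD row k 0 < PySem.List.pyGetD av j 0) then (1 : Int) else 0) := by
    rw [PySem.List.foldl_congr_mem _ _
        (fun inv k => inv + (((PySem.List.pyRange 0 (min k nn) 1).countP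
          (fun j => decide (PySem.List.pyGetD row k 0 < PySem.List.pyGetD av j 0)) : Nat) : Int)) 0 ?hbody]
    · rw [PySem.List.foldl_add, zero_add, pv_sum_map_pyRange]
      exact Finset.sum_congr rfl (fun k _ => pv_countP_pyRange _ _ _)
    · intro acc k hk
      obtain ⟨hk1, hk2⟩ := PySem.List.mem_pyRange_one.mp hk
      rw [pv_pf _ mm k hk1 hk2, pv_count_gt _ _ (pvS_pairwise av nn k)]
      have hc : (pvS av nn k).countP (fun w => decide (PySem.List.pyGetD row k 0 < w))
          = (PySem.List.pyRange 0 (min k nn) 1).countP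
              (fun j => decide (PySem.List.pyGetD row k 0 < PySem.List.pyGetD av j 0)) := by
        unfold pvS
        rw [(PySem.List.sorted_perm _ _ false).countP_eq, List.countP_map]
        rfl
      simp [hc]
  rw [hL, hR, pv_swap_sum]

theorem pv_prefs_fold (av : List Int) (nn : Int) (t : Nat) :
    (PySem.List.pyRange 1 (1 + (t : Int)) 1).foldl
      (fun (s : List Int × List (List Int)) k =>
        let pref := if k - 1 < nn then
            let v := PySem.List.pyGetD av (k - 1) 0
            PySem.List.insert s.1 ((PySem.List.bisectRight s.1 v : Nat) : Int) v
          else s.1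
        (pref, s.2 ++ [pref])) ([], [])
    = (pvS av nn (t : Int), (PySem.List.pyRange 1 (1 + (t : Int)) 1).map (pvS av nn)) := by
  induction t with
  | zero =>
      rw [PySem.List.pyRange_one_eq_nil (by omega)]
      simp [pvS, PySem.List.pyRange_one_eq_nil (show (min (0:Int) nn) ≤ 0 from min_le_left _ _),
        PySem.List.sorted_eq_foldl_insertBy]
  | succ t ih =>
      have hsplit : (1 : Int) + ((t + 1 : Nat) : Int) = (1 + (t : Int)) + 1 := by push_cast; ring
      rw [hsplit, PySem.List.pyRange_one_succ_right (by omega), List.foldl_append, List.map_append, ih]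
      have hk1 : (1 + (t : Int)) - 1 = (t : Int) := by ring
      have hstep : (if (1 + (t : Int)) - 1 < nn then
            PySem.List.insert (pvS av nn (t : Int))
              ((PySem.List.bisectRight (pvS av nn (t : Int)) (PySem.List.pyGetD av ((1 + (t : Int)) - 1) 0) : Nat) : Int)
              (PySem.List.pyGetD av ((1 + (t : Int)) - 1) 0)
          else pvS av nn (t : Int)) = pvS av nn ((t : Int) + 1) := by
        rw [hk1]
        by_cases hc : (t : Int) < nn
        · rw [if_pos hc, pv_insert_bisectRight _ _ (pvS_pairwise av nn (t : Int))]
          have hm1 : min ((t : Int)) nn = (t : Int) := by omega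
          have hm2 : min ((t : Int) + 1) nn = (t : Int) + 1 := by omega
          simp only [pvS, hm1, hm2, PySem.List.sorted_eq_foldl_insertBy]
          rw [PySem.List.pyRange_one_succ_right (by omega), List.map_append, List.foldl_append]
          simp
        · rw [if_neg hc]
          have hm : min ((t : Int) + 1) nn = min ((t : Int)) nn := by omega
          simp only [pvS, hm]
      simp only [List.foldl_cons, List.foldl_nil, List.map_cons, List.map_nil]
      rw [Prod.ext_iff]
      constructor
      · simpa using hstep
      · have hstep' := hstep
        rw [show ((t : Int) + 1) = 1 + (t : Int) from by ring] at hstep'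
        simpa using hstep'


-- the prefs fold, for any right endpoint e ≥ 1
theorem pv_prefs_fold' (av : List Int) (nn e : Int) (he : 1 ≤ e) :
    ((PySem.List.pyRange 1 e 1).foldl
      (fun (s : List Int × List (List Int)) k =>
        let pref := if k - 1 < nn then
            let v := PySem.List.pyGetD av (k - 1) 0
            PySem.List.insert s.1 ((PySem.List.bisectRight s.1 v : Nat) : Int) v
          else s.1
        (pref, s.2 ++ [pref])) ([], [])).2
    = (PySem.List.pyRange 1 e 1).map (pvS av nn) := by
  obtain ⟨t, ht⟩ : ∃ t : Nat, e = 1 + (t : Int) := ⟨(e - 1).toNat, by omega⟩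
  subst ht
  exact congrArg Prod.snd (pv_prefs_fold av nn t)

-- ===== VERDICT (by name: the statement is the Claim_ definition above) =====
theorem find_spec : Claim_equal_find := by
  intro data x _ _
  unfold Spec_find
  simp only [find, find_alt]
  by_cases hn : 1 ≤ PySem.List.pyGetD (PySem.List.pyGetD data 0 []) 0 0
  · rw [if_pos hn]
    set nn := PySem.List.pyGetD (PySem.List.pyGetD data 0 []) 0 0 with hnn
    set mm := PySem.List.pyGetD (PySem.List.pyGetD data 0 []) 1 0 with hmm
    set av := PySem.List.pyGetD data x [] with hav
    have hprefs : (if 2 ≤ mm then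
        ((PySem.List.pyRange 1 mm 1).foldl
          (fun (s : List Int × List (List Int)) k =>
            let pref := if k - 1 < nn then
                let v := PySem.List.pyGetD av (k - 1) 0
                PySem.List.insert s.1 ((PySem.List.bisectRight s.1 v : Nat) : Int) v
              else s.1
            (pref, s.2 ++ [pref])) ([], [])).2
      else []) = (PySem.List.pyRange 1 mm 1).map (pvS av nn) := by
      split_ifs with h2
      · exact pv_prefs_fold' av nn mm (by omega)
      · rw [PySem.List.pyRange_one_eq_nil (by omega)]
        rfl
    rw [hprefs]
    refine congrArg PySem.Dict.items ?_
    refine PySem.List.foldl_congr_mem _ _ _ _ ?_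
    intro acc i _
    rw [pv_inv_eq av (PySem.List.pyGetD data i []) nn mm]
  · rw [if_neg hn]
    rw [PySem.List.pyRange_one_eq_nil
      (show PySem.List.pyGetD (PySem.List.pyGetD data 0 []) 0 0 + 1 ≤ 1 by omega)]
    rfl
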